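-- pv_equiv track=rewrite | github.com/m0hammadb/CodeWarsChallenges | insane.py | triangle
-- ===== SOURCE A (Python) =====
-- baseDict = {}
--
-- def toBase3(inp):
--     if(inp in baseDict):
--         return baseDict[inp]
--     final = {}
--     backupi = inp
--     if(inp == 0):
--         return {0:0,"s":1}
--     counter = 0
--     while inp > 0:
--         final[counter] = inp % 3
--         counter += 1
--         inp = inp // 3
--     final["s"] = counter
--     baseDict[backupi] = final
--     return final
--
-- def fastComb3(n,m):
--     if(m > n):
--         return 0
--     else:
--         if(n==0 or n==1):
--             return 1
--         elif(n==2):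
--             if(m == 1):
--                 return 2
--             else:
--                 return 1
--
-- def fastBase3Comb(n,m):
--
--
--     nList = toBase3(n)
--     mList = toBase3(m)
--     prod = 1
--     k = nList["s"]
--     c = mList["s"]
--     for i in range(k):
--         currentN = nList[i]
--         currentM = 0
--         if(i < c):
--             currentM = mList[i]
--         comb = fastComb3(currentN,currentM)
--         comb = comb % 3
--         prod *= comb
--     result = prod % 3
--     return result
--
-- def charToInt(char):
--     if(char == "R"):
--         return 0
--     elif(char == "G"):
--         return 1
--     elif(char == "B"):
--         return 2
--     else:
--         return -1
--
-- def intToChar(inp):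
--     if(inp == 0):
--         return "R"
--     elif(inp == 1):
--         return "G"
--     elif(inp == 2):
--         return "B"
--
-- def triangle(m):
--     tSum = 0
--     length = len(m)
--     lengthbase3 = toBase3(length-1)
--     for i in range(0,length):
--         current = m[i]
--         cCode = charToInt(current)
--         #combin = math.comb(length-1,i)
--
--         combin2 = fastBase3Comb(length-1,i)
--         #combin2 = 1
--         #combin = combin % 3
--         tSum += (combin2 * cCode)
--
--     po = ((length % 2) * 2 - 1) % 3
--     tSum = (po * tSum) % 3
--     return intToChar(tSum)
-- ===== SOURCE B (Python) =====
-- def charToInt(char):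
--     if char == "R":
--         return 0
--     elif char == "G":
--         return 1
--     elif char == "B":
--         return 2
--     else:
--         return -1
--
--
-- def triangle(m):
--     # Direct triangle reduction: combine each adjacent pair (a, b) into (-(a+b)) % 3
--     # until one value is left. Empty input degenerates to 'R'.
--     codes = [charToInt(ch) for ch in m]
--     if not codes:
--         return "R"
--     while len(codes) > 1:
--         codes = [(-(a + b)) % 3 for a, b in zip(codes, codes[1:])]
--     return "RGB"[codes[0] % 3]
-- ===== Notes on version B (the rewrite author's own statement) =====
-- stated objective: simpler
-- what changed: A computes each C(len-1,i) mod 3 digitwise via Lucas' theorem in base 3 (with a hand-rolled base-3 decomposition and digit-binomial table) and sums coefficient*color; B instead performs the direct triangle reduction, repeatedly replacing each adjacent pair (a,b) by (-(a+b)) % 3 until one value remains.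
import Mathlib
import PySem

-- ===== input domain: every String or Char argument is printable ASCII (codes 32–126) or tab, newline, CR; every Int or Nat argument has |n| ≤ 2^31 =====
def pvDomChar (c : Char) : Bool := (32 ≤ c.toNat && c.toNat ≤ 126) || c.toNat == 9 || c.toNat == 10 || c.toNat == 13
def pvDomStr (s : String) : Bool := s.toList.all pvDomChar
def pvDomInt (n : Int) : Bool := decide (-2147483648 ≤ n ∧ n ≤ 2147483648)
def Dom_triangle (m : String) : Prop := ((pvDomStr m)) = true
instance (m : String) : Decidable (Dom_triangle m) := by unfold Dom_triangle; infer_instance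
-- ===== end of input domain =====

-- B replaces A's digitwise Lucas'-theorem evaluation of C(n-1,i) mod 3 by the direct
-- pairwise triangle reduction (objective: simpler; not faster — B is quadratic).

-- ===== PORT A =====
-- Python's toBase3 memoizes results in the module-level baseDict; the cache never changes
-- a returned value, so the port computes directly. The returned dict {0:d0, …, k-1:dk, "s":k}
-- has mixed key types; the port carries it as (digit dict for the int keys, value of "s").
def toBase3Loop (inp : Int) (counter : Int) (final : PySem.Dict Int Int) :
    PySem.Dict Int Int × Int :=
  if 0 < inp then
    toBase3Loop (PySem.Int.floordiv inp 3) (counter + 1)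
      (final.insert counter (PySem.Int.mod inp 3))
  else (final, counter)
termination_by inp.toNat
decreasing_by
  rw [PySem.Int.floordiv_eq_ediv_of_pos (by norm_num : (0:Int) < 3)]
  omega

def toBase3 (inp : Int) : PySem.Dict Int Int × Int :=
  if inp == 0 then ((PySem.Dict.empty).insert 0 0, 1)
  else toBase3Loop inp 0 PySem.Dict.empty

def fastComb3 (n m : Int) : Option Int :=
  if m > n then some 0
  else if n == 0 || n == 1 then some 1
  else if n == 2 then (if m == 1 then some 2 else some 1)
  else none  -- Python falls off the end returning None (n is always a base-3 digit here)

def fastBase3Comb (n m : Int) : Int :=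
  let nList := toBase3 n
  let mList := toBase3 m
  let k := nList.2
  let c := mList.2
  let prod := (PySem.List.pyRange 0 k 1).foldl (fun prod i =>
    let currentN := (nList.1).getD i 0        -- Python nList[i]: the key is always present
    let currentM := if i < c then (mList.1).getD i 0 else 0
    let comb := (fastComb3 currentN currentM).getD 0  -- never none here (digit arguments)
    let comb := PySem.Int.mod comb 3
    prod * comb) 1
  PySem.Int.mod prod 3

def charToInt (char : Char) : Int :=
  if char == 'R' then 0
  else if char == 'G' then 1
  else if char == 'B' then 2
  else -1

def intToChar (inp : Int) : String :=
  if inp == 0 then "R"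
  else if inp == 1 then "G"
  else if inp == 2 then "B"
  else ""  -- Python returns None (unreachable: the argument is a value of x % 3)

def triangle (m : String) : String :=
  let length : Int := PySem.Str.len m
  let _lengthbase3 := toBase3 (length - 1)   -- computed and unused, as in the Python
  let tSum := (PySem.List.pyRange 0 length 1).foldl (fun tSum i =>
    let cCode := charToInt ((PySem.Str.pyGet? m i).getD ' ')  -- i in range: never none
    let combin2 := fastBase3Comb (length - 1) i
    tSum + combin2 * cCode) 0
  let po := PySem.Int.mod ((PySem.Int.mod length 2) * 2 - 1) 3
  let tSum := PySem.Int.mod (po * tSum) 3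
  intToChar tSum

-- ===== PORT B =====
-- Source B defines the same charToInt; the port reuses the helper above.
def altStep : List Int → List Int
  | a :: b :: rest => PySem.Int.mod (-(a + b)) 3 :: altStep (b :: rest)
  | _ => []

theorem altStep_length (l : List Int) : (altStep l).length = l.length - 1 := by
  match l with
  | [] => rfl
  | [_] => rfl
  | a :: b :: rest => simp [altStep, altStep_length (b :: rest)]

def altReduce (codes : List Int) : List Int :=
  if 1 < codes.length then altReduce (altStep codes) else codes
termination_by codes.length
decreasing_by rw [altStep_length]; omega

def triangle_alt (m : String) : String :=
  let codes := m.toList.map charToInt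
  match codes with
  | [] => "R"
  | _ :: _ =>
    match altReduce codes with
    | x :: _ => ((PySem.Str.pyGet? "RGB" (PySem.Int.mod x 3)).map String.singleton).getD ""
    | [] => ""  -- unreachable: altReduce of a nonempty list is nonempty

-- ===== PRECONDITION & SPEC =====
def Spec_triangle (m : String) (out : String) : Prop := out = triangle_alt m
instance (m : String) (out : String) : Decidable (Spec_triangle m out) := by unfold Spec_triangle; infer_instance

-- ===== CLAIM (what is proved, stated in full; the proofs are below) =====
def Claim_equal_triangle : Prop := ∀ (m : String), Dom_triangle m → Spec_triangle m (triangle m)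

-- ===== LEMMAS AND PROOFS =====

-- ---- generic bridges ----
theorem pvCastMod (x : Int) : ((PySem.Int.mod x 3 : Int) : ZMod 3) = (x : ZMod 3) := by
  rw [PySem.Int.mod_eq_emod_of_pos (by norm_num), ZMod.intCast_eq_intCast_iff]
  exact Int.emod_emod_of_dvd x dvd_rfl

theorem pvIntEqOfCast {a b : Int} (ha0 : 0 ≤ a) (ha3 : a < 3) (hb0 : 0 ≤ b) (hb3 : b < 3)
    (h : (a : ZMod 3) = (b : ZMod 3)) : a = b := by
  rw [ZMod.intCast_eq_intCast_iff] at h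
  have h2 : a % 3 = b % 3 := h
  omega

-- ---- B side ----
theorem altStep_getD (l : List Int) (i : ℕ) (h : i + 1 < l.length) :
    (altStep l).getD i 0 = PySem.Int.mod (-(l.getD i 0 + l.getD (i+1) 0)) 3 := by
  induction l generalizing i with
  | nil => simp at h
  | cons a t ih =>
    match t, i with
    | b :: r, 0 => simp [altStep]
    | b :: r, (j+1) =>
      simp only [altStep, List.getD_cons_succ]
      exact ih j (by simpa using h)
    | [], _ => simp at h

def pvSig (k : ℕ) (l : List Int) : ZMod 3 :=
  ∑ i ∈ Finset.range l.length, (Nat.choose k i : ZMod 3) * ((l.getD i 0 : Int) : ZMod 3)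

theorem pvSig_pascal (k : ℕ) (a : Int) (t : List Int) :
    pvSig (k+1) (a :: t) = pvSig k (a :: t) + pvSig k t := by
  simp only [pvSig, List.length_cons]
  rw [Finset.sum_range_succ', Finset.sum_range_succ']
  simp only [List.getD_cons_succ, List.getD_cons_zero, Nat.choose_succ_succ, Nat.choose_zero_right]
  push_cast
  rw [Finset.sum_congr rfl (fun i _ => by ring :
    ∀ i ∈ Finset.range t.length,
      ((Nat.choose k i : ZMod 3) + (Nat.choose k (i+1) : ZMod 3)) * ((t.getD i 0 : Int) : ZMod 3) =
      (Nat.choose k (i+1) : ZMod 3) * ((t.getD i 0 : Int) : ZMod 3) +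
      (Nat.choose k i : ZMod 3) * ((t.getD i 0 : Int) : ZMod 3))]
  rw [Finset.sum_add_distrib]
  ring

theorem pvSig_step (l : List Int) (h : 2 ≤ l.length) :
    pvSig (l.length - 2) (altStep l) = - pvSig (l.length - 1) l := by
  match l with
  | a :: t =>
    obtain ⟨n, hn⟩ : ∃ n, t.length = n + 1 := ⟨t.length - 1, by simp at h; omega⟩
    have hL2 : (a :: t).length - 2 = n := by simp [hn]
    have hL1 : (a :: t).length - 1 = n + 1 := by simp [hn]
    rw [hL2, hL1, pvSig_pascal]
    have hlen1 : (altStep (a :: t)).length = n + 1 := by rw [altStep_length]; simp [hn]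
    have hstep : ∀ i ∈ Finset.range (n + 1),
        (Nat.choose n i : ZMod 3) * (((altStep (a :: t)).getD i 0 : Int) : ZMod 3)
        = -((Nat.choose n i : ZMod 3) * (((a :: t).getD i 0 : Int) : ZMod 3)
            + (Nat.choose n i : ZMod 3) * ((t.getD i 0 : Int) : ZMod 3)) := by
      intro i hi
      rw [altStep_getD (a :: t) i (by simp at hi; simp [hn]; omega)]
      rw [pvCastMod, List.getD_cons_succ]
      push_cast
      ring
    simp only [pvSig, hlen1, hn, List.length_cons]
    rw [Finset.sum_congr rfl hstep]
    have hpop : (∑ x ∈ Finset.range (n + 1 + 1),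
          (Nat.choose n x : ZMod 3) * (((a :: t).getD x 0 : Int) : ZMod 3))
        = ∑ x ∈ Finset.range (n + 1),
          (Nat.choose n x : ZMod 3) * (((a :: t).getD x 0 : Int) : ZMod 3) := by
      rw [Finset.sum_range_succ, Nat.choose_succ_self]
      push_cast
      ring
    rw [hpop]
    simp only [neg_add, Finset.sum_add_distrib, Finset.sum_neg_distrib]

theorem altReduce_spec (l : List Int) (h : 1 ≤ l.length) :
    ∃ r : Int, altReduce l = [r] ∧
      (r : ZMod 3) = (-1 : ZMod 3) ^ (l.length - 1) * pvSig (l.length - 1) l := by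
  by_cases h2 : 1 < l.length
  · obtain ⟨r, hr, hc⟩ := altReduce_spec (altStep l) (by rw [altStep_length]; omega)
    refine ⟨r, by rw [altReduce]; simp [h2, hr], ?_⟩
    rw [hc, altStep_length, show l.length - 1 - 1 = l.length - 2 from by omega,
      pvSig_step l (by omega)]
    obtain ⟨k, hk⟩ : ∃ k, l.length = k + 2 := ⟨l.length - 2, by omega⟩
    rw [hk, show k + 2 - 2 = k from by omega, show k + 2 - 1 = k + 1 from by omega, pow_succ]
    ring
  · obtain ⟨r, hr⟩ : ∃ r, l = [r] := by
      match l with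
      | [r] => exact ⟨r, rfl⟩
      | [] => simp at h
      | a :: b :: t => simp at h2
    subst hr
    exact ⟨r, by rw [altReduce]; simp, by simp [pvSig]⟩
termination_by l.length
decreasing_by rw [altStep_length]; omega

-- ---- A side ----
def pvND (N : ℕ) : ℕ := if N = 0 then 0 else pvND (N / 3) + 1
termination_by N
decreasing_by omega

theorem pvND_lt (N : ℕ) : N < 3 ^ pvND N := by
  induction N using Nat.strong_induction_on with
  | _ N ih =>
    rw [pvND]
    split
    · omega
    · have h1 := ih (N / 3) (by omega)
      have h2 : (3:ℕ) ^ (pvND (N / 3) + 1) = 3 * 3 ^ pvND (N / 3) := by ring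
      omega

theorem pvND_pos (N : ℕ) (h : 0 < N) : 1 ≤ pvND N := by
  rw [pvND]
  split
  · omega
  · omega

theorem toBase3Loop_spec (inp : Int) (h : 0 ≤ inp) (counter : Int) (final : PySem.Dict Int Int) :
    (toBase3Loop inp counter final).2 = counter + (pvND inp.toNat : ℕ) ∧
    ∀ x : Int, (toBase3Loop inp counter final).1.getD x 0 =
      if counter ≤ x ∧ x < counter + (pvND inp.toNat : ℕ)
      then ((inp.toNat / 3 ^ (x - counter).toNat % 3 : ℕ) : Int)
      else final.getD x 0 := by
  rw [toBase3Loop]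
  split
  · rename_i hpos
    have h3 : PySem.Int.floordiv inp 3 = ((inp.toNat / 3 : ℕ) : Int) := by
      conv_lhs => rw [show inp = ((inp.toNat : ℕ) : Int) from (Int.toNat_of_nonneg h).symm]
      exact_mod_cast PySem.Int.floordiv_natCast inp.toNat 3
    have hm : PySem.Int.mod inp 3 = ((inp.toNat % 3 : ℕ) : Int) := by
      conv_lhs => rw [show inp = ((inp.toNat : ℕ) : Int) from (Int.toNat_of_nonneg h).symm]
      exact_mod_cast PySem.Int.mod_natCast inp.toNat 3
    have ih := toBase3Loop_spec (PySem.Int.floordiv inp 3) (by rw [h3]; positivity)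
      (counter + 1) (final.insert counter (PySem.Int.mod inp 3))
    have htn : (PySem.Int.floordiv inp 3).toNat = inp.toNat / 3 := by
      rw [h3]; exact Int.toNat_natCast _
    have hnd : pvND inp.toNat = pvND (inp.toNat / 3) + 1 := by
      rw [pvND]
      rw [if_neg (by omega)]
    rw [htn] at ih
    refine ⟨by rw [ih.1, hnd]; push_cast; ring, ?_⟩
    intro x
    rw [ih.2 x]
    by_cases hx1 : counter + 1 ≤ x ∧ x < counter + 1 + (pvND (inp.toNat / 3) : ℕ)
    · rw [if_pos hx1, if_pos (by rw [hnd]; push_cast at hx1 ⊢; omega)]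
      have hj : (x - counter).toNat = (x - (counter + 1)).toNat + 1 := by omega
      rw [hj, pow_succ', ← Nat.div_div_eq_div_mul]
    · rw [if_neg hx1]
      by_cases hx2 : x = counter
      · subst hx2
        rw [PySem.Dict.getD_insert_self, if_pos (by rw [hnd]; push_cast; omega), hm]
        simp
      · rw [PySem.Dict.getD_insert, if_neg hx2,
          if_neg (by rw [hnd]; push_cast at hx1 ⊢; omega)]
  · rename_i hneg
    have h0 : inp.toNat = 0 := by omega
    rw [h0]
    constructor
    · simp [pvND]
    · intro x
      rw [if_neg (by simp [pvND])]
termination_by inp.toNat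
decreasing_by rw [PySem.Int.floordiv_eq_ediv_of_pos (by norm_num : (0:Int) < 3)]; omega

theorem toBase3_spec (n : Int) (h : 0 ≤ n) :
    1 ≤ (toBase3 n).2 ∧
    n < 3 ^ (toBase3 n).2.toNat ∧
    ∀ x : Int, 0 ≤ x → x < (toBase3 n).2 →
      (toBase3 n).1.getD x 0 = ((n.toNat / 3 ^ x.toNat % 3 : ℕ) : Int) := by
  rw [toBase3]
  split
  · rename_i h0
    have hn0 : n = 0 := by simpa using h0
    subst hn0
    refine ⟨by norm_num, by norm_num, ?_⟩
    intro x hx0 hx1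
    have hx : x = 0 := by omega
    subst hx
    rw [PySem.Dict.getD_insert_self]
    simp
  · rename_i h0
    have hpos : 0 < n := by
      have : ¬ n = 0 := by simpa using h0
      omega
    obtain ⟨hc, hd⟩ := toBase3Loop_spec n h 0 PySem.Dict.empty
    have hge : 1 ≤ pvND n.toNat := pvND_pos n.toNat (by omega)
    refine ⟨by rw [hc]; omega, ?_, ?_⟩
    · rw [hc]
      have ht : ((0 : Int) + (pvND n.toNat : ℕ)).toNat = pvND n.toNat := by omega
      rw [ht]
      have hlt2 : (n.toNat : Int) < ((3 : ℕ) ^ pvND n.toNat : ℕ) := by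
        exact_mod_cast pvND_lt n.toNat
      push_cast at hlt2
      omega
    · intro x hx0 hx2
      rw [hc] at hx2
      rw [hd x, if_pos (by omega)]
      have : (x - 0).toNat = x.toNat := by omega
      rw [this]

theorem fastComb3_digit (d e : ℕ) (hd : d < 3) (he : e < 3) :
    (fastComb3 (d : Int) (e : Int)).getD 0 = (Nat.choose d e : Int) := by
  interval_cases d <;> interval_cases e <;> decide

theorem pvFoldlProd (K : ℕ) (g : ℕ → Int) :
    ((((List.range K).foldl (fun p j => p * g j) 1 : Int) : Int) : ZMod 3)
      = ∏ j ∈ Finset.range K, ((g j : Int) : ZMod 3) := by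
  induction K with
  | zero => simp
  | succ k ih =>
    rw [List.range_succ, List.foldl_append, Finset.prod_range_succ, ← ih]
    simp

theorem pvFoldlSum (K : ℕ) (g : ℕ → Int) :
    ((((List.range K).foldl (fun t j => t + g j) 0 : Int) : Int) : ZMod 3)
      = ∑ j ∈ Finset.range K, ((g j : Int) : ZMod 3) := by
  induction K with
  | zero => simp
  | succ k ih =>
    rw [List.range_succ, List.foldl_append, Finset.sum_range_succ, ← ih]
    simp

theorem fastBase3Comb_spec (n i : ℕ) (h : i ≤ n) :
    ((fastBase3Comb (n : Int) (i : Int) : Int) : ZMod 3) = (Nat.choose n i : ZMod 3) ∧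
    0 ≤ fastBase3Comb (n : Int) (i : Int) ∧ fastBase3Comb (n : Int) (i : Int) < 3 := by
  refine ⟨?_, PySem.Int.mod_nonneg _ (by norm_num), PySem.Int.mod_lt _ (by norm_num)⟩
  obtain ⟨hn1, hn2, hn3⟩ := toBase3_spec (n : Int) (by positivity)
  obtain ⟨hi1, hi2, hi3⟩ := toBase3_spec (i : Int) (by positivity)
  simp only [fastBase3Comb]
  rw [pvCastMod, PySem.List.pyRange_zero, List.foldl_map]
  rw [pvFoldlProd ((toBase3 (n : Int)).2).toNat (fun j =>
    PySem.Int.mod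
      ((fastComb3 ((toBase3 (n : Int)).1.getD (j : Int) 0)
        (if (j : Int) < (toBase3 (i : Int)).2 then (toBase3 (i : Int)).1.getD (j : Int) 0
         else 0)).getD 0) 3)]
  have hfac : ∀ j ∈ Finset.range ((toBase3 (n : Int)).2).toNat,
      ((PySem.Int.mod
        ((fastComb3 ((toBase3 (n : Int)).1.getD (j : Int) 0)
          (if (j : Int) < (toBase3 (i : Int)).2 then (toBase3 (i : Int)).1.getD (j : Int) 0
           else 0)).getD 0) 3 : Int) : ZMod 3)
      = ((Nat.choose (n / 3 ^ j % 3) (i / 3 ^ j % 3) : ℕ) : ZMod 3) := by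
    intro j hj
    rw [Finset.mem_range] at hj
    rw [pvCastMod]
    have hjk : (j : Int) < (toBase3 (n : Int)).2 := by omega
    rw [hn3 (j : Int) (by positivity) hjk]
    have hMdig : (if (j : Int) < (toBase3 (i : Int)).2 then (toBase3 (i : Int)).1.getD (j : Int) 0
        else 0) = ((i / 3 ^ j % 3 : ℕ) : Int) := by
      split
      · rename_i hlt
        rw [hi3 (j : Int) (by positivity) hlt]
        simp
      · rename_i hge
        have hc0 : 0 ≤ (toBase3 (i : Int)).2 := by omega
        have h1 : (i : Int) < 3 ^ ((toBase3 (i : Int)).2).toNat := hi2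
        have h2 : ((toBase3 (i : Int)).2).toNat ≤ j := by omega
        have h3 : (3 : Int) ^ ((toBase3 (i : Int)).2).toNat ≤ 3 ^ j :=
          pow_le_pow_right₀ (by norm_num) h2
        have h4 : i < 3 ^ j := by
          have : (i : Int) < 3 ^ j := lt_of_lt_of_le h1 h3
          exact_mod_cast this
        rw [Nat.div_eq_of_lt h4]
        simp
    rw [hMdig]
    simp only [Int.toNat_natCast]
    rw [fastComb3_digit (n / 3 ^ j % 3) (i / 3 ^ j % 3) (Nat.mod_lt _ (by norm_num))
      (Nat.mod_lt _ (by norm_num))]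
    push_cast
    ring
  rw [Finset.prod_congr rfl hfac]
  haveI : Fact (Nat.Prime 3) := ⟨by norm_num⟩
  have hK1 : n < 3 ^ ((toBase3 (n : Int)).2).toNat := by exact_mod_cast hn2
  have hK2 : i < 3 ^ ((toBase3 (n : Int)).2).toNat := by omega
  have lucas := (Choose.choose_modEq_prod_range_choose (p := 3) (n := n) (k := i)
    (a := ((toBase3 (n : Int)).2).toNat) hK1 hK2)
  rw [← ZMod.intCast_eq_intCast_iff] at lucas
  push_cast at lucas ⊢
  exact lucas.symm


theorem pvPo (L : ℕ) (h : 1 ≤ L) :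
    ((PySem.Int.mod ((PySem.Int.mod (L : Int) 2) * 2 - 1) 3 : Int) : ZMod 3)
      = (-1 : ZMod 3) ^ (L - 1) := by
  rw [pvCastMod]
  have hm : PySem.Int.mod (L : Int) 2 = ((L % 2 : ℕ) : Int) := by
    exact_mod_cast PySem.Int.mod_natCast L 2
  rcases Nat.even_or_odd L with he | ho
  · have h2 : L % 2 = 0 := Nat.even_iff.mp he
    rw [hm, h2]
    have hodd : Odd (L - 1) := by
      rcases he with ⟨k, hk⟩
      exact ⟨k - 1, by omega⟩
    rw [hodd.neg_one_pow]
    push_cast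
    ring
  · have h2 : L % 2 = 1 := Nat.odd_iff.mp ho
    rw [hm, h2]
    have heven : Even (L - 1) := by
      rcases ho with ⟨k, hk⟩
      exact ⟨k, by omega⟩
    rw [heven.neg_one_pow]
    push_cast
    ring

theorem pvRender (v : Int) (h0 : 0 ≤ v) (h3 : v < 3) :
    ((PySem.Str.pyGet? "RGB" v).map String.singleton).getD "" = intToChar v := by
  interval_cases v <;> decide

theorem pvAclass (m : String) (hL : 1 ≤ m.toList.length) :
    triangle m = intToChar (PySem.Int.mod
      (PySem.Int.mod ((PySem.Int.mod (PySem.Str.len m) 2) * 2 - 1) 3 *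
        (PySem.List.pyRange 0 (PySem.Str.len m) 1).foldl
          (fun tSum i => tSum +
            fastBase3Comb (PySem.Str.len m - 1) i * charToInt ((PySem.Str.pyGet? m i).getD ' '))
          0) 3) ∧
    ((PySem.Int.mod
      (PySem.Int.mod ((PySem.Int.mod (PySem.Str.len m) 2) * 2 - 1) 3 *
        (PySem.List.pyRange 0 (PySem.Str.len m) 1).foldl
          (fun tSum i => tSum +
            fastBase3Comb (PySem.Str.len m - 1) i * charToInt ((PySem.Str.pyGet? m i).getD ' '))
          0) 3 : Int) : ZMod 3)
      = (-1 : ZMod 3) ^ (m.toList.length - 1)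
        * pvSig (m.toList.length - 1) (m.toList.map charToInt) := by
  constructor
  · rw [triangle]
  · rw [pvCastMod]
    push_cast
    have hsum : (((PySem.List.pyRange 0 (PySem.Str.len m) 1).foldl
        (fun tSum i => tSum +
          fastBase3Comb (PySem.Str.len m - 1) i * charToInt ((PySem.Str.pyGet? m i).getD ' '))
        0 : Int) : ZMod 3)
        = pvSig (m.toList.length - 1) (m.toList.map charToInt) := by
      rw [PySem.Str.len_eq, PySem.List.pyRange_zero, List.foldl_map]
      rw [pvFoldlSum ((m.toList.length : Int)).toNat (fun j =>
        fastBase3Comb ((m.toList.length : Int) - 1) (j : Int) *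
          charToInt ((PySem.Str.pyGet? m (j : Int)).getD ' '))]
      simp only [Int.toNat_natCast]
      rw [pvSig]
      rw [List.length_map]
      refine Finset.sum_congr rfl ?_
      intro j hj
      rw [Finset.mem_range] at hj
      push_cast
      have h1 : ((m.toList.length : Int) - 1) = ((m.toList.length - 1 : ℕ) : Int) := by
        push_cast [Nat.cast_sub hL]
        ring
      rw [h1, (fastBase3Comb_spec (m.toList.length - 1) j (by omega)).1]
      have h2 : (PySem.Str.pyGet? m (j : Int)).getD ' ' = m.toList[j] := by
        rw [PySem.Str.pyGet?_natCast, List.getElem?_eq_getElem hj]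
        rfl
      rw [h2]
      have h3 : (m.toList.map charToInt).getD j 0 = charToInt m.toList[j] := by
        rw [List.getD_eq_getElem?_getD, List.getElem?_map, List.getElem?_eq_getElem hj]
        rfl
      rw [h3]
    rw [hsum, PySem.Str.len_eq, pvPo m.toList.length hL]

theorem pvBclass (m : String) (hL : 1 ≤ m.toList.length) :
    ∃ r : Int, triangle_alt m
        = ((PySem.Str.pyGet? "RGB" (PySem.Int.mod r 3)).map String.singleton).getD "" ∧
      ((r : Int) : ZMod 3)
        = (-1 : ZMod 3) ^ (m.toList.length - 1)
          * pvSig (m.toList.length - 1) (m.toList.map charToInt) := by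
  obtain ⟨r, hr, hc⟩ := altReduce_spec (m.toList.map charToInt) (by simpa using hL)
  refine ⟨r, ?_, by simpa using hc⟩
  rw [triangle_alt]
  obtain ⟨c0, rest, hsplit⟩ : ∃ c0 rest, m.toList.map charToInt = c0 :: rest := by
    cases h : m.toList.map charToInt with
    | nil => rw [h] at hr; simp [altReduce] at hr
    | cons a b => exact ⟨a, b, rfl⟩
  simp only [hsplit, hsplit ▸ hr]

-- ===== VERDICT (by name: the statement is the Claim_ definition above) =====
theorem triangle_spec : Claim_equal_triangle := by
  unfold Claim_equal_triangle
  intro m _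
  unfold Spec_triangle
  by_cases hL : m.toList.length = 0
  · have hnil : m.toList = [] := List.length_eq_zero_iff.mp hL
    rw [triangle]
    simp only [triangle_alt, hnil, List.map_nil, PySem.Str.len_eq, List.length_nil,
      Nat.cast_zero, PySem.List.pyRange_zero, Int.toNat_zero, List.range_zero,
      List.foldl_nil]
    decide
  · obtain ⟨hA1, hA2⟩ := pvAclass m (by omega)
    obtain ⟨r, hB1, hB2⟩ := pvBclass m (by omega)
    rw [hA1, hB1,
      pvRender _ (PySem.Int.mod_nonneg _ (by norm_num)) (PySem.Int.mod_lt _ (by norm_num))]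
    congr 1
    refine pvIntEqOfCast (PySem.Int.mod_nonneg _ (by norm_num))
      (PySem.Int.mod_lt _ (by norm_num)) (PySem.Int.mod_nonneg _ (by norm_num))
      (PySem.Int.mod_lt _ (by norm_num)) ?_
    rw [hA2, pvCastMod, hB2]
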